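-- pv_equiv track=rewrite | github.com/EmbeddedLLM/JamAIBase | services/api/tests/gen_table/test_row_ops_v2.py | _assert_consecutive
-- ===== SOURCE A (Python) =====
-- def _assert_consecutive(lst: list) -> bool:
--     """
--     Assert that identical elements occur consecutively in the list.
--
--     Args:
--         lst: List of strings
--
--     Raises:
--         AssertionError: If identical elements are not grouped together
--     """
--     if not lst:
--         raise AssertionError("List is empty")
--     seen = {lst[0]}
--     current_element = lst[0]
--     for element in lst[1:]:
--         if element != current_element:
--             # We're starting a new group
--             if element in seen:
--                 return False
--             seen.add(element)
--             current_element = element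
--     return True
-- ===== SOURCE B (Python) =====
-- def _assert_consecutive(lst: list) -> bool:
--     """
--     Assert that identical elements occur consecutively in the list.
--
--     Build-then-check: collapse consecutive duplicate runs into `groups`,
--     then identical elements are consecutively grouped iff no value heads
--     two distinct runs, i.e. `groups` has no duplicates at all.
--     """
--     if not lst:
--         raise AssertionError("List is empty")
--     groups = [lst[0]]
--     for x in lst[1:]:
--         if x != groups[-1]:
--             groups.append(x)
--     return len(groups) == len(set(groups))
-- ===== Notes on version B (the rewrite author's own statement) =====
-- stated objective: simpler
-- what changed: Replaces A's single early-returning pass with a seen-set and current-element tracker by a two-phase decomposition: first collapse consecutive duplicate runs into a 'groups' list, then return whether 'groups' is duplicate-free (len(groups) == len(set(groups))).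
import Mathlib
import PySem

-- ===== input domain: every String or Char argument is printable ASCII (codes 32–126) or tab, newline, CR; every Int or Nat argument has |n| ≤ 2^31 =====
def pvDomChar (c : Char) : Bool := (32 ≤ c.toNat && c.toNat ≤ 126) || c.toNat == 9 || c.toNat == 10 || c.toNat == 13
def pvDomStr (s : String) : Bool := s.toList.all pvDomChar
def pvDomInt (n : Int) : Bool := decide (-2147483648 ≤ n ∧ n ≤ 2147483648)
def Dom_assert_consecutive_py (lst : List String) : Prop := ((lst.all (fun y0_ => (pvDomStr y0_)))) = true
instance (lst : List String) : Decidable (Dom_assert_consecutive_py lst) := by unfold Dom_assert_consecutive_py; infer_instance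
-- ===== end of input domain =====

-- B changes A's early-returning scan (seen-set + current-element tracker) into a build-then-check
-- decomposition (collapse runs, then test duplicate-freeness); objective: simpler.

-- ===== PORT A =====
-- the for-loop of A: state = (seen, current_element); early `return False` = result false
def pvALoop (seen : PySem.Set String) (cur : String) : List String → Bool
  | [] => true
  | e :: rest =>
    if e ≠ cur then
      if PySem.Set.contains seen e then false
      else pvALoop (PySem.Set.add seen e) e rest
    else pvALoop seen cur rest

def assert_consecutive_py (lst : List String) : Bool :=
  match lst with
  | [] => false   -- Python raises AssertionError here; excluded by Pre_
  | h :: t => pvALoop (PySem.Set.ofList [h]) h t   -- seen = {lst[0]}, current_element = lst[0]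

-- ===== PORT B =====
-- B's for-loop: append x to groups when it differs from groups[-1] (groups is always nonempty)
def pvBCollapse (groups : List String) : List String → List String
  | [] => groups
  | x :: rest =>
    if x ≠ groups.getLastD "" then pvBCollapse (groups ++ [x]) rest
    else pvBCollapse groups rest

def assert_consecutive_py_alt (lst : List String) : Bool :=
  match lst with
  | [] => false   -- Python raises AssertionError here; excluded by Pre_
  | h :: t =>
    let groups := pvBCollapse [h] t
    groups.length == (PySem.Set.ofList groups).length   -- len(groups) == len(set(groups))

-- ===== PRECONDITION & SPEC =====
-- Pre_ excludes exactly the empty list, on which the Python A raises AssertionError.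
def Pre_assert_consecutive_py (lst : List String) : Prop := lst ≠ []
instance (lst : List String) : Decidable (Pre_assert_consecutive_py lst) := by unfold Pre_assert_consecutive_py; infer_instance
def pvWitness_assert_consecutive_py : List String := ["a", "a", "b"]

def Spec_assert_consecutive_py (lst : List String) (out : Bool) : Prop := out = assert_consecutive_py_alt lst
instance (lst : List String) (out : Bool) : Decidable (Spec_assert_consecutive_py lst out) := by unfold Spec_assert_consecutive_py; infer_instance

-- ===== CLAIM (what is proved, stated in full; the proofs are below) =====
def Claim_equal_assert_consecutive_py : Prop := ∀ (lst : List String), Dom_assert_consecutive_py lst → Pre_assert_consecutive_py lst → Spec_assert_consecutive_py lst (assert_consecutive_py lst)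

-- ===== LEMMAS AND PROOFS =====

-- length of foldl add is bounded by start length + number added
theorem pv_foldl_add_length_le (xs : List String) : ∀ (s : PySem.Set String),
    (xs.foldl PySem.Set.add s).length ≤ s.length + xs.length := by
  induction xs with
  | nil => intro s; simp
  | cons x xs ih =>
    intro s
    simp only [List.foldl_cons]
    calc (xs.foldl PySem.Set.add (PySem.Set.add s x)).length
        ≤ (PySem.Set.add s x).length + xs.length := ih _
      _ ≤ (s.length + 1) + xs.length := by
          rw [PySem.Set.add_eq_ite]
          split <;> simp
      _ = s.length + (x :: xs).length := by simp [Nat.add_comm, Nat.add_left_comm]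

-- foldl add reaches the maximal length iff the added elements are fresh and pairwise distinct
theorem pv_foldl_add_length_eq_iff (xs : List String) : ∀ (s : PySem.Set String),
    ((xs.foldl PySem.Set.add s).length = s.length + xs.length) ↔ (xs.Nodup ∧ ∀ x ∈ xs, x ∉ s) := by
  induction xs with
  | nil => intro s; simp
  | cons x xs ih =>
    intro s
    simp only [List.foldl_cons]
    by_cases hx : x ∈ s
    · rw [PySem.Set.add_of_mem hx]
      constructor
      · intro h
        exfalso
        have := pv_foldl_add_length_le xs s
        simp only [List.length_cons] at h
        omega
      · rintro ⟨-, hall⟩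
        exact absurd hx (hall x (by simp))
    · rw [PySem.Set.add_of_not_mem hx,
        show List.length s + (x :: xs).length = List.length (s ++ [x]) + xs.length by
          simp [List.length_append]; omega,
        ih]
      simp only [List.nodup_cons, List.mem_cons, List.mem_append, List.not_mem_nil, or_false]
      constructor
      · rintro ⟨hnd, hall⟩
        refine ⟨⟨fun hm => (hall x hm) (Or.inr rfl), hnd⟩, ?_⟩
        rintro y (rfl | hy)
        · exact hx
        · intro hys; exact hall y hy (Or.inl hys)
      · rintro ⟨⟨hxn, hnd⟩, hall⟩
        refine ⟨hnd, fun y hy => ?_⟩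
        rintro (hys | rfl)
        · exact hall y (Or.inr hy) hys
        · exact hxn hy

-- len(g) == len(set(g)) is exactly Nodup g
theorem pv_check_eq_nodup (g : List String) :
    (g.length == (PySem.Set.ofList g).length) = decide g.Nodup := by
  have h := pv_foldl_add_length_eq_iff g []
  simp only [List.length_nil, Nat.zero_add, List.not_mem_nil, not_false_iff, imp_true_iff,
    and_true] at h
  rw [PySem.Set.ofList_eq_foldl]
  by_cases hnd : g.Nodup
  · simp [hnd, (h.mpr (by simpa using hnd)).symm]
  · simp only [hnd, decide_false, beq_eq_false_iff_ne, ne_eq]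
    intro he
    exact hnd (by simpa using h.mp he.symm)

-- B's collapse only appends: the start list is a prefix of the result
theorem pv_collapse_prefix (rest : List String) : ∀ (groups : List String),
    groups <+: pvBCollapse groups rest := by
  induction rest with
  | nil => intro groups; simp [pvBCollapse]
  | cons x rest ih =>
    intro groups
    simp only [pvBCollapse]
    split
    · exact List.IsPrefix.trans (by simp) (ih (groups ++ [x]))
    · exact ih groups

-- main invariant: A's loop with seen = groups (nodup) and cur = last of groups equals B's check
theorem pv_loop_eq (rest : List String) : ∀ (groups : List String) (cur : String),
    groups ≠ [] → groups.Nodup → cur = groups.getLastD "" →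
    pvALoop groups cur rest
      = ((pvBCollapse groups rest).length == (PySem.Set.ofList (pvBCollapse groups rest)).length) := by
  induction rest with
  | nil =>
    intro groups cur hne hnd hcur
    simp [pvALoop, pvBCollapse, pv_check_eq_nodup, hnd]
  | cons e rest ih =>
    intro groups cur hne hnd hcur
    simp only [pvALoop, pvBCollapse, ← hcur]
    by_cases he : e = cur
    · simp only [he, ne_eq, not_true_eq_false, if_false]
      exact ih groups cur hne hnd hcur
    · simp only [ne_eq, he, not_false_eq_true, if_true]
      by_cases hmem : e ∈ groups
      · -- A returns False; groups ++ [e] has a duplicate, hence so does the final collapse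
        have hc : PySem.Set.contains groups e = true := (PySem.Set.contains_iff groups e).mpr hmem
        simp only [hc, if_true]
        have hpre : (groups ++ [e]) <+: pvBCollapse (groups ++ [e]) rest := pv_collapse_prefix rest _
        have hnotnd : ¬ (pvBCollapse (groups ++ [e]) rest).Nodup := by
          intro h
          have : (groups ++ [e]).Nodup := h.sublist hpre.sublist
          rw [List.nodup_append] at this
          exact this.2.2 e hmem e (by simp) rfl
        rw [pv_check_eq_nodup]
        exact (decide_eq_false hnotnd).symm
      · have hc : PySem.Set.contains groups e = false := by
          rw [← Bool.not_eq_true]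
          intro h
          exact hmem ((PySem.Set.contains_iff groups e).mp h)
        simp only [hc, Bool.false_eq_true, if_false]
        rw [PySem.Set.add_of_not_mem hmem]
        have hnd' : (groups ++ [e]).Nodup := by
          rw [List.nodup_append]
          refine ⟨hnd, List.nodup_singleton e, fun a ha b hb => ?_⟩
          simp only [List.mem_singleton] at hb
          subst hb
          exact fun h => hmem (h ▸ ha)
        exact ih (groups ++ [e]) e (by simp) hnd' (by simp)

-- ===== VERDICT (by name: the statement is the Claim_ definition above) =====
theorem assert_consecutive_py_spec : Claim_equal_assert_consecutive_py := by
  intro lst _ hpre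
  unfold Spec_assert_consecutive_py
  match lst with
  | [] => exact absurd rfl hpre
  | h :: t =>
    show pvALoop (PySem.Set.ofList [h]) h t = _
    have hof : PySem.Set.ofList [h] = [h] := by
      rw [PySem.Set.ofList_eq_foldl]
      simp
    rw [hof]
    exact pv_loop_eq t [h] h (by simp) (by simp) (by simp)
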